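-- pv_equiv track=rewrite | github.com/rish-d/FS-Factbase | extractors/text_clipper.py | locate_target_financial_pages
-- ===== SOURCE A (Python) =====
-- from typing import Tuple
--
-- def score_page_as_balance_sheet(text: str) -> int:
--     text_lower = text.lower().replace("\n", " ")
--     while "  " in text_lower: text_lower = text_lower.replace("  ", " ")
--     score = 0
--     # Core anchors
--     if "statements of financial position" in text_lower or "statement of financial position" in text_lower or "balance sheet" in text_lower:
--         score += 50
--
--     # Structural keywords indicating a real table, not just ToC
--     if "assets" in text_lower: score += 10
--     if "liabilities" in text_lower: score += 10
--     if "equity" in text_lower: score += 10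
--     if "cash and short-term funds" in text_lower: score += 20
--     if "deposits from customers" in text_lower: score += 20
--
--     # Financial table features
--     if "note" in text_lower: score += 5
--     if "rm'000" in text_lower or "rm 000" in text_lower or "in thousands" in text_lower: score += 15
--
--     # Number density (crude but effective check for actual tables)
--     numbers = sum(c.isdigit() for c in text)
--     if numbers > 50:
--         score += 20
--
--     return score
--
-- def score_page_as_income_statement(text: str) -> int:
--     text_lower = text.lower().replace("\n", " ")
--     while "  " in text_lower: text_lower = text_lower.replace("  ", " ")
--     score = 0
--     # Core anchors
--     if "statements of profit or loss" in text_lower or "statement of profit or loss" in text_lower or "income statements" in text_lower or "income statement" in text_lower: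
--         score += 50
--
--     # Structural keywords
--     if "interest income" in text_lower: score += 20
--     if "interest expense" in text_lower: score += 20
--     if "net interest income" in text_lower: score += 20
--     if "profit before taxation" in text_lower or "profit before tax" in text_lower: score += 20
--     if "taxation" in text_lower or "tax expense" in text_lower: score += 10
--
--     if "note" in text_lower: score += 5
--     if "rm'000" in text_lower or "rm 000" in text_lower or "in thousands" in text_lower: score += 15
--
--     numbers = sum(c.isdigit() for c in text)
--     if numbers > 50:
--         score += 20
--
--     return score
--
-- def locate_target_financial_pages(pages_text: dict[int, str]) -> Tuple[list[int], list[int]]: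
--     """Returns a list of high-scoring page numbers for Balance Sheet and Income Statement"""
--     bs_scores = []
--     is_scores = []
--
--     for page_num, text in pages_text.items():
--         bs_scores.append((page_num, score_page_as_balance_sheet(text)))
--         is_scores.append((page_num, score_page_as_income_statement(text)))
--
--     # Get highest scoring pages (must be >= 80 to be fundamentally structural)
--     bs_candidates = sorted([p for p in bs_scores if p[1] >= 80], key=lambda x: x[1], reverse=True)
--     is_candidates = sorted([p for p in is_scores if p[1] >= 80], key=lambda x: x[1], reverse=True)
--
--     bs_pages = [p[0] for p in bs_candidates[:2]] # Take top 2 pages just in case it spans 2 pages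
--     is_pages = [p[0] for p in is_candidates[:2]]
--
--     return bs_pages, is_pages
-- ===== SOURCE B (Python) =====
-- # Streaming selection: one pass keeps the two best candidates per category directly
-- # (no score lists, no sort-then-slice), with one shared normalization/digit-count per
-- # page and a generic rule-table scorer instead of two flat if-chains.
--
-- BS_RULES = [
--     (("statements of financial position", "statement of financial position", "balance sheet"), 50),
--     (("assets",), 10),
--     (("liabilities",), 10),
--     (("equity",), 10),
--     (("cash and short-term funds",), 20),
--     (("deposits from customers",), 20),
--     (("note",), 5),
--     (("rm'000", "rm 000", "in thousands"), 15),
-- ]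
--
-- IS_RULES = [
--     (("statements of profit or loss", "statement of profit or loss", "income statements", "income statement"), 50),
--     (("interest income",), 20),
--     (("interest expense",), 20),
--     (("net interest income",), 20),
--     (("profit before taxation", "profit before tax"), 20),
--     (("taxation", "tax expense"), 10),
--     (("note",), 5),
--     (("rm'000", "rm 000", "in thousands"), 15),
-- ]
--
--
-- def _normalize(text):
--     t = text.lower().replace("\n", " ")
--     while "  " in t:
--         t = t.replace("  ", " ")
--     return t
--
--
-- def _score(t, rules):
--     return sum(pts for phrases, pts in rules if any(p in t for p in phrases))
--
--
-- def _push(top, page, score):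
--     # keep the two best (page, score) seen so far; strict '>' preserves the
--     # first-seen order among equal scores (= Python's stable reverse sort)
--     t1, t2 = top
--     if t1 is None or score > t1[1]:
--         return ((page, score), t1)
--     if t2 is None or score > t2[1]:
--         return (t1, (page, score))
--     return top
--
--
-- def locate_target_financial_pages(pages_text):
--     bs_top = (None, None)
--     is_top = (None, None)
--     for page, text in pages_text.items():
--         t = _normalize(text)
--         bonus = 20 if sum(c.isdigit() for c in text) > 50 else 0
--         b = _score(t, BS_RULES) + bonus
--         if b >= 80:
--             bs_top = _push(bs_top, page, b)
--         i = _score(t, IS_RULES) + bonus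
--         if i >= 80:
--             is_top = _push(is_top, page, i)
--     return ([pr[0] for pr in bs_top if pr is not None],
--             [pr[0] for pr in is_top if pr is not None])
-- ===== Notes on version B (the rewrite author's own statement) =====
-- stated objective: alternative
-- what changed: B replaces A's build-full-score-lists / filter / stable-reverse-sort / slice pipeline with a single streaming pass that maintains the two best (page,score) candidates per category directly (strict '>' pushes reproduce the stable sort's tie order), normalizes and digit-counts each page once for both categories, and scores via a generic (phrases,points) rule table instead of two flat if-chains.
import Mathlib
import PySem

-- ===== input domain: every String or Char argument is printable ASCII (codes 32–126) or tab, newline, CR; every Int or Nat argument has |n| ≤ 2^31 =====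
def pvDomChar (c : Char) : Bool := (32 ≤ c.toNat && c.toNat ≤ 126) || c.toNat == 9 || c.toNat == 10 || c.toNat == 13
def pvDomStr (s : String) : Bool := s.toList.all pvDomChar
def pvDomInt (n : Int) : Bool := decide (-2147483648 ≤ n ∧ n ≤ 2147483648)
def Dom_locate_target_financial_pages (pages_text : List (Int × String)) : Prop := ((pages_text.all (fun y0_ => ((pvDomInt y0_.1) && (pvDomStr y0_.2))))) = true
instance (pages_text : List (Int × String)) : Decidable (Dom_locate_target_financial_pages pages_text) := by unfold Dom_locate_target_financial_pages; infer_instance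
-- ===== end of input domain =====

-- B replaces A's score-lists/filter/stable-reverse-sort/slice pipeline with one streaming
-- pass keeping the two best candidates per category (objective: alternative).

-- ===== PORT A =====
-- shared normalization helper: both Pythons contain the identical code
--   t = text.lower().replace("\n", " "); while "  " in t: t = t.replace("  ", " ")
-- the while-loop is ported with a length fuel (each replace strictly shortens, so len suffices)
def pvCollapse : Nat → String → String
  | 0, s => s
  | n + 1, s => if PySem.Str.isIn "  " s then pvCollapse n (PySem.Str.replace s "  " " ") else s

def pvNormalize (text : String) : String :=
  let t := PySem.Str.replace (PySem.Str.lower text) "\n" " "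
  pvCollapse t.toList.length t

-- sum(c.isdigit() for c in text)
def pvDigits (text : String) : Int :=
  text.toList.foldl (fun n c => n + (if PySem.Chars.isdigit c then 1 else 0)) 0

def score_page_as_balance_sheet (text : String) : Int :=
  let tl := pvNormalize text
  let s : Int := 0
  let s := if PySem.Str.isIn "statements of financial position" tl || PySem.Str.isIn "statement of financial position" tl || PySem.Str.isIn "balance sheet" tl then s + 50 else s
  let s := if PySem.Str.isIn "assets" tl then s + 10 else s
  let s := if PySem.Str.isIn "liabilities" tl then s + 10 else s
  let s := if PySem.Str.isIn "equity" tl then s + 10 else s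
  let s := if PySem.Str.isIn "cash and short-term funds" tl then s + 20 else s
  let s := if PySem.Str.isIn "deposits from customers" tl then s + 20 else s
  let s := if PySem.Str.isIn "note" tl then s + 5 else s
  let s := if PySem.Str.isIn "rm'000" tl || PySem.Str.isIn "rm 000" tl || PySem.Str.isIn "in thousands" tl then s + 15 else s
  let numbers := pvDigits text
  let s := if numbers > 50 then s + 20 else s
  s

def score_page_as_income_statement (text : String) : Int :=
  let tl := pvNormalize text
  let s : Int := 0
  let s := if PySem.Str.isIn "statements of profit or loss" tl || PySem.Str.isIn "statement of profit or loss" tl || PySem.Str.isIn "income statements" tl || PySem.Str.isIn "income statement" tl then s + 50 else s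
  let s := if PySem.Str.isIn "interest income" tl then s + 20 else s
  let s := if PySem.Str.isIn "interest expense" tl then s + 20 else s
  let s := if PySem.Str.isIn "net interest income" tl then s + 20 else s
  let s := if PySem.Str.isIn "profit before taxation" tl || PySem.Str.isIn "profit before tax" tl then s + 20 else s
  let s := if PySem.Str.isIn "taxation" tl || PySem.Str.isIn "tax expense" tl then s + 10 else s
  let s := if PySem.Str.isIn "note" tl then s + 5 else s
  let s := if PySem.Str.isIn "rm'000" tl || PySem.Str.isIn "rm 000" tl || PySem.Str.isIn "in thousands" tl then s + 15 else s
  let numbers := pvDigits text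
  let s := if numbers > 50 then s + 20 else s
  s

def locate_target_financial_pages (pages_text : List (Int × String)) : List Int × List Int :=
  let scores := pages_text.foldl
    (fun (acc : List (Int × Int) × List (Int × Int)) pt =>
      (acc.1 ++ [(pt.1, score_page_as_balance_sheet pt.2)],
       acc.2 ++ [(pt.1, score_page_as_income_statement pt.2)])) ([], [])
  let bs_candidates := PySem.List.sorted (scores.1.filter (fun p => decide (p.2 ≥ 80))) (fun x => x.2) true
  let is_candidates := PySem.List.sorted (scores.2.filter (fun p => decide (p.2 ≥ 80))) (fun x => x.2) true
  let bs_pages := (PySem.List.slice bs_candidates none (some 2)).map (fun p => p.1)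
  let is_pages := (PySem.List.slice is_candidates none (some 2)).map (fun p => p.1)
  (bs_pages, is_pages)

-- ===== PORT B =====
def BS_RULES : List (List String × Int) :=
  [([ "statements of financial position", "statement of financial position", "balance sheet"], 50),
   (["assets"], 10), (["liabilities"], 10), (["equity"], 10),
   (["cash and short-term funds"], 20), (["deposits from customers"], 20),
   (["note"], 5), (["rm'000", "rm 000", "in thousands"], 15)]

def IS_RULES : List (List String × Int) :=
  [([ "statements of profit or loss", "statement of profit or loss", "income statements", "income statement"], 50),
   (["interest income"], 20), (["interest expense"], 20), (["net interest income"], 20),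
   (["profit before taxation", "profit before tax"], 20), (["taxation", "tax expense"], 10),
   (["note"], 5), (["rm'000", "rm 000", "in thousands"], 15)]

-- _score: sum(pts for phrases, pts in rules if any(p in t for p in phrases))
def pvScore (t : String) (rules : List (List String × Int)) : Int :=
  ((rules.filter (fun r => r.1.any (fun p => PySem.Str.isIn p t))).map (fun r => r.2)).sum

-- _push: keep the two best (page, score); strict '>' keeps first-seen order on ties
def pvPush (top : Option (Int × Int) × Option (Int × Int)) (page score : Int) :
    Option (Int × Int) × Option (Int × Int) :=
  match top with
  | (none, _) => (some (page, score), none)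
  | (some t1, t2) =>
    if score > t1.2 then (some (page, score), some t1)
    else
      match t2 with
      | none => (some t1, some (page, score))
      | some t2' => if score > t2'.2 then (some t1, some (page, score)) else (some t1, some t2')

-- [pr[0] for pr in top if pr is not None]
def pvRender (top : Option (Int × Int) × Option (Int × Int)) : List Int :=
  (match top.1 with | some a => [a.1] | none => []) ++
  (match top.2 with | some b => [b.1] | none => [])

def locate_target_financial_pages_alt (pages_text : List (Int × String)) : List Int × List Int :=
  let st := pages_text.foldl
    (fun (acc : (Option (Int × Int) × Option (Int × Int)) × (Option (Int × Int) × Option (Int × Int))) pt =>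
      let t := pvNormalize pt.2
      let bonus : Int := if pvDigits pt.2 > 50 then 20 else 0
      let b := pvScore t BS_RULES + bonus
      let i := pvScore t IS_RULES + bonus
      (if b ≥ 80 then pvPush acc.1 pt.1 b else acc.1,
       if i ≥ 80 then pvPush acc.2 pt.1 i else acc.2))
    ((none, none), (none, none))
  (pvRender st.1, pvRender st.2)

-- ===== PRECONDITION & SPEC =====
def Spec_locate_target_financial_pages (pages_text : List (Int × String)) (out : List Int × List Int) : Prop := out = locate_target_financial_pages_alt pages_text
instance (pages_text : List (Int × String)) (out : List Int × List Int) : Decidable (Spec_locate_target_financial_pages pages_text out) := by unfold Spec_locate_target_financial_pages; infer_instance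

-- ===== CLAIM =====
def Claim_equal_locate_target_financial_pages : Prop := ∀ (pages_text : List (Int × String)), Dom_locate_target_financial_pages pages_text → Spec_locate_target_financial_pages pages_text (locate_target_financial_pages pages_text)

-- ===== LEMMAS AND PROOFS =====

-- sum over a filtered map, as the fold the flat if-chain computes
theorem sum_filter_map_eq_foldl {c : Type} (p : c -> Bool) (f : c -> Int) (l : List c) (init : Int) :
    init + ((l.filter p).map f).sum = l.foldl (fun s x => if p x then s + f x else s) init := by
  induction l generalizing init with
  | nil => simp
  | cons x xs ih =>
    simp only [List.filter_cons, List.foldl_cons]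
    by_cases h : p x
    · simp only [h, if_true, List.map_cons, List.sum_cons, <- ih]; ring
    · simp only [h, Bool.false_eq_true, if_false, <- ih]

theorem pvScore_foldl (t : String) (rules : List (List String × Int)) :
    pvScore t rules
      = rules.foldl (fun s r => if r.1.any (fun p => PySem.Str.isIn p t) then s + r.2 else s) 0 := by
  rw [pvScore, <- sum_filter_map_eq_foldl, zero_add]

theorem score_bs_eq (t : String) :
    score_page_as_balance_sheet t
      = pvScore (pvNormalize t) BS_RULES + (if pvDigits t > 50 then 20 else 0) := by
  unfold score_page_as_balance_sheet
  rw [pvScore_foldl]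
  generalize pvNormalize t = tl
  generalize pvDigits t = d
  simp only [BS_RULES, List.foldl, List.any_cons, List.any_nil, Bool.or_false, Bool.or_assoc]
  by_cases hd : d > 50 <;> simp [hd]

theorem score_is_eq (t : String) :
    score_page_as_income_statement t
      = pvScore (pvNormalize t) IS_RULES + (if pvDigits t > 50 then 20 else 0) := by
  unfold score_page_as_income_statement
  rw [pvScore_foldl]
  generalize pvNormalize t = tl
  generalize pvDigits t = d
  simp only [IS_RULES, List.foldl, List.any_cons, List.any_nil, Bool.or_false, Bool.or_assoc]
  by_cases hd : d > 50 <;> simp [hd]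

-- A's score-collecting loop: two unconditional appends
theorem foldA_eq {c d : Type} (f g : c -> d) (l : List c) (a b : List d) :
    l.foldl (fun acc x => (acc.1 ++ [f x], acc.2 ++ [g x])) (a, b)
      = (a ++ l.map f, b ++ l.map g) := by
  rw [PySem.List.foldl_prod_mk (fun s e => s ++ [f e]) (fun s e => s ++ [g e]),
      PySem.List.foldl_append_singleton_eq_map, PySem.List.foldl_append_singleton_eq_map]

-- the first two entries of a list, as B's state
def pvStateOf (acc : List (Int × Int)) : Option (Int × Int) × Option (Int × Int) :=
  (acc.head?, acc.tail.head?)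

-- one insertBy step, seen through the first two entries, is exactly B's push
theorem push_insertBy (x : Int × Int) (acc : List (Int × Int)) :
    pvStateOf (PySem.List.insertBy (fun a b => decide (b.2 < a.2)) x acc)
      = pvPush (pvStateOf acc) x.1 x.2 := by
  match acc with
  | [] => rfl
  | [a] =>
    simp only [PySem.List.insertBy, pvStateOf, pvPush]
    by_cases h : a.2 < x.2 <;> simp [h]
  | a :: b :: rest =>
    simp only [PySem.List.insertBy, pvStateOf, pvPush]
    by_cases h1 : a.2 < x.2
    · simp [h1]
    · by_cases h2 : b.2 < x.2 <;> simp [h1, h2]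

-- the streaming fold equals the first two entries of A's insertion fold
theorem stream_eq {c : Type} (cand : c -> Int × Int) (m : List c) (acc : List (Int × Int)) :
    m.foldl (fun s x => pvPush s (cand x).1 (cand x).2) (pvStateOf acc)
      = pvStateOf (m.foldl (fun a x => PySem.List.insertBy (fun a b => decide (b.2 < a.2)) (cand x) a) acc) := by
  induction m generalizing acc with
  | nil => rfl
  | cons x xs ih =>
    simp only [List.foldl_cons, <- push_insertBy]
    exact ih _

-- rendering the first two entries = map fst of take 2
theorem render_take2 (acc : List (Int × Int)) :
    (acc.take 2).map (fun p => p.1) = pvRender (pvStateOf acc) := by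
  match acc with
  | [] => rfl
  | [a] => rfl
  | a :: b :: rest => rfl

-- one category of A's pipeline equals one category of B's streaming pass
theorem category_eq {c : Type} (cand : c -> Int × Int) (l : List c) :
    (PySem.List.slice (PySem.List.sorted ((l.map cand).filter (fun p => decide (p.2 >= 80))) (fun x => x.2) true)
        none (some 2)).map (fun p => p.1)
      = pvRender (l.foldl (fun s x => if (cand x).2 >= 80 then pvPush s (cand x).1 (cand x).2 else s)
          ((none, none) : Option (Int × Int) × Option (Int × Int))) := by
  rw [PySem.List.slice_to _ (by norm_num : (0:Int) <= 2),
      PySem.List.sorted_rev_eq_foldl_insertBy, List.filter_map, List.foldl_map]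
  have h2 : (2:Int).toNat = 2 := rfl
  rw [h2, render_take2, <- stream_eq cand (l.filter ((fun p => decide (p.2 >= 80)) ∘ cand)) [],
      List.foldl_filter]
  simp only [Function.comp_apply, decide_eq_true_eq]
  rfl

-- ===== VERDICT =====
theorem locate_target_financial_pages_spec : Claim_equal_locate_target_financial_pages := by
  intro pages _
  unfold Spec_locate_target_financial_pages
  simp only [locate_target_financial_pages, locate_target_financial_pages_alt]
  rw [foldA_eq]
  simp only [List.nil_append, score_bs_eq, score_is_eq]
  rw [category_eq (fun pt : Int × String => (pt.1, pvScore (pvNormalize pt.2) BS_RULES + (if pvDigits pt.2 > 50 then 20 else 0))) pages,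
      category_eq (fun pt : Int × String => (pt.1, pvScore (pvNormalize pt.2) IS_RULES + (if pvDigits pt.2 > 50 then 20 else 0))) pages]
  have hsplit := PySem.List.foldl_prod_mk
    (fun (s : Option (Int × Int) × Option (Int × Int)) (pt : Int × String) =>
      if (pvScore (pvNormalize pt.2) BS_RULES + if pvDigits pt.2 > 50 then 20 else 0) ≥ 80 then
        pvPush s pt.1 (pvScore (pvNormalize pt.2) BS_RULES + if pvDigits pt.2 > 50 then 20 else 0)
      else s)
    (fun (s : Option (Int × Int) × Option (Int × Int)) (pt : Int × String) =>
      if (pvScore (pvNormalize pt.2) IS_RULES + if pvDigits pt.2 > 50 then 20 else 0) ≥ 80 then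
        pvPush s pt.1 (pvScore (pvNormalize pt.2) IS_RULES + if pvDigits pt.2 > 50 then 20 else 0)
      else s)
    pages (none, none) (none, none)
  rw [hsplit]
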